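-- pv_equiv track=rewrite | github.com/warintara/projet_webapp_moteur_de_recherche_bibliotheque | download_gutenberg_fr.py | choose_text_url
-- ===== SOURCE A (Python) =====
-- def choose_text_url(formats):
--     for mime, url in formats.items():
--         if mime.startswith("text/plain"):
--             return url
--     for mime, url in formats.items():
--         if mime.startswith("text/"):
--             return url
--     return None
-- ===== SOURCE B (Python) =====
-- def choose_text_url(formats):
--     fallback = None
--     for mime, url in formats.items():
--         if mime.startswith("text/plain"):
--             return url
--         if fallback is None and mime.startswith("text/"):
--             fallback = url
--     return fallback
-- ===== Notes on version B (the rewrite author's own statement) =====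
-- stated objective: simpler
-- what changed: Replaces A's two full passes over formats with a single pass that returns text/plain immediately and carries the first text/ URL as a fallback.
import Mathlib
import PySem

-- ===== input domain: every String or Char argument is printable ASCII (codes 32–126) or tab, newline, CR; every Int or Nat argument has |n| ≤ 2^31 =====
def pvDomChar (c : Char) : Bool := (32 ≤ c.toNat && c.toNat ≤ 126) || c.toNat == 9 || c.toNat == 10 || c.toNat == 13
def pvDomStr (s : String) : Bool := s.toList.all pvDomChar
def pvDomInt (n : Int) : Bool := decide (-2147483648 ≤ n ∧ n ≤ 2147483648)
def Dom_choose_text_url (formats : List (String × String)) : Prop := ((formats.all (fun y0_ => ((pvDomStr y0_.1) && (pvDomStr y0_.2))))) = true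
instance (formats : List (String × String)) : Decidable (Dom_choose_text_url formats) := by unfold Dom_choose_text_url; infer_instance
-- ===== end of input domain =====

-- B replaces A's two full passes with a single pass carrying a first-text/ fallback (simpler).


-- ===== PORT A =====
-- first loop of A: return url on the first mime starting with "text/plain"
def chooseLoopPlain : List (String × String) → Option String
  | [] => none
  | (mime, url) :: rest =>
    if PySem.Str.startswith mime "text/plain" then some url else chooseLoopPlain rest

-- second loop of A: return url on the first mime starting with "text/"
def chooseLoopText : List (String × String) → Option String
  | [] => none
  | (mime, url) :: rest =>
    if PySem.Str.startswith mime "text/" then some url else chooseLoopText rest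

def choose_text_url (formats : List (String × String)) : Option String :=
  match chooseLoopPlain formats with
  | some url => some url
  | none =>
    match chooseLoopText formats with
    | some url => some url
    | none => none

-- ===== PORT B =====
-- single pass with a fallback accumulator (Source B's loop)
def chooseLoopB : List (String × String) → Option String → Option String
  | [], fallback => fallback
  | (mime, url) :: rest, fallback =>
    if PySem.Str.startswith mime "text/plain" then some url
    else chooseLoopB rest
      (if fallback.isNone && PySem.Str.startswith mime "text/" then some url else fallback)

def choose_text_url_alt (formats : List (String × String)) : Option String :=
  chooseLoopB formats none

-- ===== PRECONDITION & SPEC =====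
def Spec_choose_text_url (formats : List (String × String)) (out : Option String) : Prop := out = choose_text_url_alt formats
instance (formats : List (String × String)) (out : Option String) : Decidable (Spec_choose_text_url formats out) := by unfold Spec_choose_text_url; infer_instance

-- ===== CLAIM (what is proved, stated in full; the proofs are below) =====
def Claim_equal_choose_text_url : Prop := ∀ (formats : List (String × String)), Dom_choose_text_url formats → Spec_choose_text_url formats (choose_text_url formats)

-- ===== LEMMAS AND PROOFS =====
-- loop invariant: B's single pass equals (first plain) orelse (fallback) orelse (first text/)
theorem chooseLoopB_eq (xs : List (String × String)) (fb : Option String) :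
    chooseLoopB xs fb =
      match chooseLoopPlain xs with
      | some u => some u
      | none =>
        match fb with
        | some v => some v
        | none => chooseLoopText xs := by
  induction xs generalizing fb with
  | nil => cases fb <;> simp [chooseLoopB, chooseLoopPlain, chooseLoopText]
  | cons p rest ih =>
    obtain ⟨mime, url⟩ := p
    by_cases hp : PySem.Chars.startswith mime.toList ['t','e','x','t','/','p','l','a','i','n'] = true
    · simp [chooseLoopB, chooseLoopPlain, hp]
    · by_cases ht : PySem.Chars.startswith mime.toList ['t','e','x','t','/'] = true
      · cases fb <;>
          simp [chooseLoopB, chooseLoopPlain, chooseLoopText, hp, ht, ih]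
      · cases fb <;>
          simp [chooseLoopB, chooseLoopPlain, chooseLoopText, hp, ht, ih]

-- ===== VERDICT (by name: the statement is the Claim_ definition above) =====
theorem choose_text_url_spec : Claim_equal_choose_text_url := by
  intro formats _
  unfold Spec_choose_text_url choose_text_url choose_text_url_alt
  rw [chooseLoopB_eq]
  cases chooseLoopPlain formats <;> cases chooseLoopText formats <;> simp
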